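-- pv_equiv track=rewrite | github.com/EdoardoGiussani/AdventCalendar | day23/day23.1.py | SelectDestinationCup
-- ===== SOURCE A (Python) =====
-- def SelectDestinationCup(cups, current_cup):
--     destination_cup = current_cup
--     while True:
--         destination_cup -= 1
--         if destination_cup < min(cups):
--             destination_cup = max(cups)
--         if destination_cup in cups:
--             break
--     return destination_cup
-- ===== SOURCE B (Python) =====
-- def SelectDestinationCup(cups, current_cup):
--     return max((c for c in cups if c < current_cup), default=max(cups))
-- ===== Notes on version B (the rewrite author's own statement) =====
-- stated objective: simpler
-- what changed: Replaces A's decrement-and-test-membership loop (with wraparound to max when falling below min) by one filtering pass: the maximum cup strictly below current_cup, defaulting to max(cups) when none exists.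
import Mathlib
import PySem

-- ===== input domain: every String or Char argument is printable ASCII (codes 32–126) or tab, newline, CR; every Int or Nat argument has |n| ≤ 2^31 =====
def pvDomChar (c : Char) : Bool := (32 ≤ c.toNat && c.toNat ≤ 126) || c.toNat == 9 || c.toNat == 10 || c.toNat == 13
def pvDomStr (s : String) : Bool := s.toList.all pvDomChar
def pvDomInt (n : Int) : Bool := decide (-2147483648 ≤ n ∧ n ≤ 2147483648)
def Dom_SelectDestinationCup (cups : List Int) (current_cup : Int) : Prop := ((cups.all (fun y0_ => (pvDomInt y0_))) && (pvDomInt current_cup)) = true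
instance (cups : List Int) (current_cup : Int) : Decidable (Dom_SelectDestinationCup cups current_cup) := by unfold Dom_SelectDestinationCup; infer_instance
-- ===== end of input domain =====

-- B replaces A's decrement/wraparound membership loop by a single filtering pass (simpler).

-- ===== PORT A =====
-- A's `while True` loop; the fuel argument only makes the recursion total (the callers
-- always pass enough fuel for a nonempty list). Each step is A's loop body: decrement,
-- wrap below min to max, stop on membership.
def SelectDestinationCupLoop (cups : List Int) : Nat → Int → Int
  | 0, d => d
  | n + 1, d =>
    let d1 := d - 1
    let d2 := if d1 < cups.min?.getD 0 then cups.max?.getD 0 else d1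
    if d2 ∈ cups then d2 else SelectDestinationCupLoop cups n d2

def SelectDestinationCup (cups : List Int) (current_cup : Int) : Int :=
  SelectDestinationCupLoop cups ((current_cup - cups.min?.getD 0).toNat + 2) current_cup

-- ===== PORT B =====
def SelectDestinationCup_alt (cups : List Int) (current_cup : Int) : Int :=
  ((cups.filter (fun c => c < current_cup)).max?).getD (cups.max?.getD 0)

-- ===== PRECONDITION & SPEC =====
-- Pre_ excludes only the empty list, on which both A and B raise ValueError (min/max of empty sequence).
def Pre_SelectDestinationCup (cups : List Int) (current_cup : Int) : Prop := cups ≠ []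
instance (cups : List Int) (current_cup : Int) : Decidable (Pre_SelectDestinationCup cups current_cup) := by unfold Pre_SelectDestinationCup; infer_instance
def pvWitness_SelectDestinationCup : List Int × Int := ([3, 1, 2], 2)

def Spec_SelectDestinationCup (cups : List Int) (current_cup : Int) (out : Int) : Prop := out = SelectDestinationCup_alt cups current_cup
instance (cups : List Int) (current_cup : Int) (out : Int) : Decidable (Spec_SelectDestinationCup cups current_cup out) := by unfold Spec_SelectDestinationCup; infer_instance

-- ===== CLAIM (what is proved, stated in full; the proofs are below) =====
def Claim_equal_SelectDestinationCup : Prop := ∀ (cups : List Int) (current_cup : Int), Dom_SelectDestinationCup cups current_cup → Pre_SelectDestinationCup cups current_cup → Spec_SelectDestinationCup cups current_cup (SelectDestinationCup cups current_cup)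

-- ===== LEMMAS AND PROOFS =====

-- the value B computes, as a function of the "current" pointer d
def pvBval (cups : List Int) (d : Int) : Int :=
  ((cups.filter (fun c => c < d)).max?).getD (cups.max?.getD 0)

lemma pvBval_filter_nil (cups : List Int) (d : Int)
    (h : ∀ c ∈ cups, ¬ c < d) : pvBval cups d = cups.max?.getD 0 := by
  unfold pvBval
  have hnil : cups.filter (fun c => c < d) = [] := by
    simp only [List.filter_eq_nil_iff, decide_eq_true_eq]
    exact h
  simp [hnil]

lemma pvBval_mem (cups : List Int) (d : Int) (hmem : (d - 1) ∈ cups) :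
    pvBval cups d = d - 1 := by
  unfold pvBval
  have : (cups.filter (fun c => c < d)).max? = some (d - 1) := by
    rw [List.max?_eq_some_iff]
    refine ⟨?_, ?_⟩
    · simp only [List.mem_filter, decide_eq_true_eq]
      exact ⟨hmem, by omega⟩
    · intro b hb
      simp only [List.mem_filter, decide_eq_true_eq] at hb
      omega
  simp [this]

lemma pvBval_step (cups : List Int) (d : Int) (hnot : (d - 1) ∉ cups) :
    pvBval cups d = pvBval cups (d - 1) := by
  unfold pvBval
  have : cups.filter (fun c => c < d) = cups.filter (fun c => c < d - 1) := by
    apply List.filter_congr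
    intro c hc
    have : c ≠ d - 1 := fun h => hnot (h ▸ hc)
    simp only [decide_eq_decide]
    omega
  rw [this]

lemma pvLoop_eq (cups : List Int) (mn : Int) (hmn : cups.min? = some mn) :
    ∀ (fuel : Nat) (d : Int), (d - mn).toNat + 2 ≤ fuel + 1 →
      SelectDestinationCupLoop cups fuel d = pvBval cups d := by
  intro fuel
  induction fuel with
  | zero => intro d h; omega
  | succ n ih =>
    intro d h
    have hmx : ∃ mx, cups.max? = some mx := by
      cases hcx : cups.max? with
      | none =>
        have : cups = [] := List.max?_eq_none_iff.mp hcx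
        subst this; simp at hmn
      | some mx => exact ⟨mx, rfl⟩
    obtain ⟨mx, hmx⟩ := hmx
    simp only [SelectDestinationCupLoop, hmn, hmx, Option.getD_some]
    by_cases hlt : d - 1 < mn
    · -- wraparound: d2 = mx, which is a member, so the loop stops at mx
      have hmxmem : mx ∈ cups := List.max?_mem hmx
      simp only [if_pos hlt, if_pos hmxmem]
      rw [pvBval_filter_nil cups d]
      · simp [hmx]
      · intro c hc
        have hle : mn ≤ c := by
          have h1 := List.min?_eq_some_iff.mp hmn
          exact h1.2 c hc
        omega
    · simp only [if_neg hlt]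
      by_cases hmem : (d - 1) ∈ cups
      · simp only [if_pos hmem]
        exact (pvBval_mem cups d hmem).symm
      · simp only [if_neg hmem]
        rw [ih (d - 1) (by omega), pvBval_step cups d hmem]

-- ===== VERDICT (by name: the statement is the Claim_ definition above) =====
theorem SelectDestinationCup_spec : Claim_equal_SelectDestinationCup := by
  intro cups current_cup _ hpre
  obtain ⟨mn, hmn⟩ : ∃ mn, cups.min? = some mn := by
    cases hc : cups.min? with
    | none => exact absurd (List.min?_eq_none_iff.mp hc) hpre
    | some mn => exact ⟨mn, rfl⟩
  show SelectDestinationCup cups current_cup = SelectDestinationCup_alt cups current_cup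
  unfold SelectDestinationCup
  rw [hmn, Option.getD_some]
  exact pvLoop_eq cups mn hmn _ current_cup (by omega)
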